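-- pv_equiv track=rewrite | github.com/Evilnames/Collector | tapestry.py | _make_herringbone_grid
-- ===== SOURCE A (Python) =====
-- TAPESTRY_COLS_PER_BLOCK = 16
--
-- TAPESTRY_ROWS_PER_BLOCK = 8
--
-- def _empty(h, w=1):
--     cols = w * TAPESTRY_COLS_PER_BLOCK
--     return [[False] * cols for _ in range(h * TAPESTRY_ROWS_PER_BLOCK)]
--
-- def _make_herringbone_grid(height, width=1):
--     cols = width * TAPESTRY_COLS_PER_BLOCK
--     rows = height * TAPESTRY_ROWS_PER_BLOCK
--     g = _empty(height, width)
--     for r in range(rows):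
--         for c in range(cols):
--             zone = (r + c) // 4
--             if zone % 2 == 0:
--                 if (c - r) % 4 < 2:
--                     g[r][c] = True
--             else:
--                 if (c + r) % 4 < 2:
--                     g[r][c] = True
--     return g
-- ===== SOURCE B (Python) =====
-- TAPESTRY_COLS_PER_BLOCK = 16
--
-- TAPESTRY_ROWS_PER_BLOCK = 8
--
--
-- def _make_herringbone_grid(height, width=1):
--     cols = width * TAPESTRY_COLS_PER_BLOCK
--     rows = height * TAPESTRY_ROWS_PER_BLOCK
--     # The pattern is periodic with period 8 in both directions, and rows/cols
--     # are multiples of 8: build one 8x8 tile and replicate it.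
--     tile = [[(c - r) % 4 < 2 if ((r + c) // 4) % 2 == 0 else (c + r) % 4 < 2
--              for c in range(8)]
--             for r in range(8)]
--     reps = cols // 8
--     return [tile[i % 8] * reps for i in range(rows)]
-- ===== Notes on version B (the rewrite author's own statement) =====
-- stated objective: faster
-- what changed: Instead of computing the zone formula at every one of the rows*cols cells, B builds a single 8x8 tile (the pattern is 8-periodic in both coordinates) and produces each output row by indexing the tile at i%8 and replicating it cols//8 times.
import Mathlib
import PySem

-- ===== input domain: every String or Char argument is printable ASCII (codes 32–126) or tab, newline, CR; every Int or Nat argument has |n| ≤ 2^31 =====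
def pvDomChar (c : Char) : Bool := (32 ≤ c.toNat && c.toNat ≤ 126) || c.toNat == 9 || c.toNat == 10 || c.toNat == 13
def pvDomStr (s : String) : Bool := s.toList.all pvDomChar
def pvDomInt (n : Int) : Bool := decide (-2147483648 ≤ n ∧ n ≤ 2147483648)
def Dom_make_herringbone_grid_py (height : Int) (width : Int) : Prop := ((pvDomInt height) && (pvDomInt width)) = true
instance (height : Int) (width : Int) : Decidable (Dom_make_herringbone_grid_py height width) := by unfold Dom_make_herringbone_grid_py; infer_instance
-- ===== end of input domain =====

-- B replaces A's full rows×cols cell-by-cell fill by building one 8×8 tile and replicating it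
-- (the zone pattern is 8-periodic in both coordinates); objective: faster (constant factor).

-- ===== PORT A =====
-- _empty(h, w): [[False] * cols for _ in range(h * 8)]; '[False]*cols' is [] for cols ≤ 0, so .toNat is exact.
def pv_empty (h : Int) (w : Int) : List (List Bool) :=
  let cols := w * 16
  (PySem.List.pyRange 0 (h * 8) 1).map (fun _ => List.replicate cols.toNat false)

-- literal port of A: double loop mutating g; 'g[r][c] = True' with 0 ≤ r < len(g), 0 ≤ c < len(g[r]),
-- so List.getD/List.set at r.toNat/c.toNat is exact.
def make_herringbone_grid_py (height : Int) (width : Int) : List (List Bool) :=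
  let cols := width * 16
  let rows := height * 8
  let g := pv_empty height width
  (PySem.List.pyRange 0 rows 1).foldl (fun g r =>
    (PySem.List.pyRange 0 cols 1).foldl (fun g c =>
      let zone := PySem.Int.floordiv (r + c) 4
      if PySem.Int.mod zone 2 = 0 then
        if PySem.Int.mod (c - r) 4 < 2 then
          g.set r.toNat ((g.getD r.toNat []).set c.toNat true)
        else g
      else
        if PySem.Int.mod (c + r) 4 < 2 then
          g.set r.toNat ((g.getD r.toNat []).set c.toNat true)
        else g) g) g

-- ===== PORT B =====
-- literal port of B: 8×8 tile comprehension, then rows i = tile[i % 8] * (cols // 8);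
-- Python list repetition 'xs * n' ([] for n ≤ 0) is flatten (replicate n.toNat xs), exact.
def make_herringbone_grid_py_alt (height : Int) (width : Int) : List (List Bool) :=
  let cols := width * 16
  let rows := height * 8
  let tile := (PySem.List.pyRange 0 8 1).map (fun r =>
    (PySem.List.pyRange 0 8 1).map (fun c =>
      if PySem.Int.mod (PySem.Int.floordiv (r + c) 4) 2 = 0 then
        decide (PySem.Int.mod (c - r) 4 < 2)
      else
        decide (PySem.Int.mod (c + r) 4 < 2)))
  let reps := PySem.Int.floordiv cols 8
  (PySem.List.pyRange 0 rows 1).map (fun i =>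
    (List.replicate reps.toNat (PySem.List.pyGetD tile (PySem.Int.mod i 8) [])).flatten)

-- ===== PRECONDITION & SPEC =====
def Spec_make_herringbone_grid_py (height : Int) (width : Int) (out : List (List Bool)) : Prop := out = make_herringbone_grid_py_alt height width
instance (height : Int) (width : Int) (out : List (List Bool)) : Decidable (Spec_make_herringbone_grid_py height width out) := by unfold Spec_make_herringbone_grid_py; infer_instance

-- ===== CLAIM (what is proved, stated in full; the proofs are below) =====
def Claim_equal_make_herringbone_grid_py : Prop := ∀ (height : Int) (width : Int), Dom_make_herringbone_grid_py height width → Spec_make_herringbone_grid_py height width (make_herringbone_grid_py height width)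

-- ===== LEMMAS AND PROOFS =====

-- the per-cell boolean both programs compute
def pvCell (r c : Int) : Bool :=
  if PySem.Int.mod (PySem.Int.floordiv (r + c) 4) 2 = 0 then
    decide (PySem.Int.mod (c - r) 4 < 2)
  else
    decide (PySem.Int.mod (c + r) 4 < 2)

-- the common canonical form of both grids
def pvCanonRow (cols r : Int) : List Bool := (PySem.List.pyRange 0 cols 1).map (fun c => pvCell r c)
def pvCanon (rows cols : Int) : List (List Bool) :=
  (PySem.List.pyRange 0 rows 1).map (fun r => pvCanonRow cols r)

-- 8-periodicity of the cell formula in both coordinates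
lemma pvCell_per (r c : Int) :
    pvCell (PySem.Int.mod r 8) (PySem.Int.mod c 8) = pvCell r c := by
  unfold pvCell
  rw [PySem.Int.mod_eq_emod_of_pos (a := r) (show (0:Int) < 8 by norm_num),
      PySem.Int.mod_eq_emod_of_pos (a := c) (show (0:Int) < 8 by norm_num)]
  simp only [PySem.Int.mod_eq_emod_of_pos (show (0:Int) < 2 by norm_num),
      PySem.Int.mod_eq_emod_of_pos (show (0:Int) < 4 by norm_num),
      PySem.Int.floordiv_eq_ediv_of_pos (show (0:Int) < 4 by norm_num)]
  have h1 : (r % 8 + c % 8) / 4 % 2 = (r + c) / 4 % 2 := by omega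
  have h2 : (c % 8 - r % 8) % 4 = (c - r) % 4 := by omega
  have h3 : (c % 8 + r % 8) % 4 = (c + r) % 4 := by omega
  rw [h1, h2, h3]

-- A's inner-loop step, as it acts on the grid and on a single row
def pvStepG (r : Int) (g : List (List Bool)) (c : Int) : List (List Bool) :=
  if PySem.Int.mod (PySem.Int.floordiv (r + c) 4) 2 = 0 then
    if PySem.Int.mod (c - r) 4 < 2 then
      g.set r.toNat ((g.getD r.toNat []).set c.toNat true)
    else g
  else
    if PySem.Int.mod (c + r) 4 < 2 then
      g.set r.toNat ((g.getD r.toNat []).set c.toNat true)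
    else g

def pvStepR (r : Int) (row : List Bool) (c : Int) : List Bool :=
  if pvCell r c then row.set c.toNat true else row

lemma pvStepG_as_row (r : Int) (g : List (List Bool)) (c : Int) :
    pvStepG r g c = if pvCell r c then g.set r.toNat ((g.getD r.toNat []).set c.toNat true) else g := by
  unfold pvStepG pvCell; split_ifs <;> simp_all <;> omega

-- the inner fold changes only row r
lemma pvInner_set (L : List Int) (r : Int) :
    ∀ (g : List (List Bool)), r.toNat < g.length →
    L.foldl (pvStepG r) g = g.set r.toNat (L.foldl (pvStepR r) (g.getD r.toNat [])) := by
  induction L with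
  | nil =>
      intro g hg
      simp [List.foldl, List.getD_eq_getElem?_getD, List.getElem?_eq_getElem hg,
        List.set_getElem_self]
  | cons c L ih =>
      intro g hg
      simp only [List.foldl_cons]
      rw [pvStepG_as_row]
      by_cases hc : pvCell r c
      · have hlen : r.toNat < (g.set r.toNat ((g.getD r.toNat []).set c.toNat true)).length := by
          simpa using hg
        rw [if_pos hc, ih _ hlen]
        have hget : (g.set r.toNat ((g.getD r.toNat []).set c.toNat true)).getD r.toNat []
            = (g.getD r.toNat []).set c.toNat true := by
          simp [List.getD_eq_getElem?_getD, List.getElem?_set_self hg]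
        rw [hget, List.set_set]
        simp [pvStepR, hc]
      · rw [if_neg hc, ih _ hg]
        simp [pvStepR, hc]

-- filling one row
lemma pvRow_fill (r : Int) :
    ∀ (k colsN : Nat), k ≤ colsN →
    (PySem.List.pyRange 0 (k : Int) 1).foldl (pvStepR r) (List.replicate colsN false)
      = ((PySem.List.pyRange 0 (k : Int) 1).map (fun c => pvCell r c))
        ++ List.replicate (colsN - k) false := by
  intro k
  induction k with
  | zero =>
      intro colsN _
      simp [PySem.List.pyRange_one_eq_nil (le_refl (0:Int))]
  | succ k ih =>
      intro colsN hk
      have hcast : ((k : Int) + 1) = ((k + 1 : Nat) : Int) := by push_cast; ring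
      rw [← hcast, PySem.List.pyRange_one_succ_right (by positivity)]
      rw [List.foldl_append, List.map_append, ih colsN (by omega)]
      have hlen : ((PySem.List.pyRange 0 (k : Int) 1).map (fun c => pvCell r c)).length = k := by
        simp [PySem.List.length_pyRange_one]
      have hrep : List.replicate (colsN - k) false
          = false :: List.replicate (colsN - (k + 1)) false := by
        rw [← List.replicate_succ]; congr 1; omega
      rw [hrep]
      simp only [List.foldl_cons, List.foldl_nil, pvStepR]
      by_cases hc : pvCell r (k : Int)
      · rw [if_pos hc]
        rw [show ((k:Int).toNat) = k by simp, List.set_append]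
        simp [hlen, hc, List.append_assoc]
      · rw [if_neg hc]
        simp [hc, List.append_assoc]

-- one full pass of the inner loop over a fresh row equals the canonical row
lemma pvInner_on_fresh (r cols : Int) :
    (PySem.List.pyRange 0 cols 1).foldl (pvStepR r) (List.replicate cols.toNat false)
      = pvCanonRow cols r := by
  unfold pvCanonRow
  by_cases h : cols ≤ 0
  · have : cols.toNat = 0 := by omega
    simp [PySem.List.pyRange_one_eq_nil h, this]
  · have h' : 0 < cols := by omega
    have key := pvRow_fill r cols.toNat cols.toNat (le_refl _)
    rw [Nat.sub_self] at key
    have hc : ((cols.toNat : Int)) = cols := by omega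
    rw [hc] at key
    simpa using key

-- the outer loop builds the canonical grid
lemma pvOuter_fill (cols : Int) :
    ∀ (k rowsN : Nat), k ≤ rowsN →
    (PySem.List.pyRange 0 (k : Int) 1).foldl
        (fun g r => (PySem.List.pyRange 0 cols 1).foldl (pvStepG r) g)
        (List.replicate rowsN (List.replicate cols.toNat false))
      = ((PySem.List.pyRange 0 (k : Int) 1).map (fun r => pvCanonRow cols r))
        ++ List.replicate (rowsN - k) (List.replicate cols.toNat false) := by
  intro k
  induction k with
  | zero =>
      intro rowsN _
      simp [PySem.List.pyRange_one_eq_nil (le_refl (0:Int))]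
  | succ k ih =>
      intro rowsN hk
      have hcast : ((k : Int) + 1) = ((k + 1 : Nat) : Int) := by push_cast; ring
      rw [← hcast, PySem.List.pyRange_one_succ_right (by positivity)]
      rw [List.foldl_append, List.map_append, ih rowsN (by omega)]
      have hlen : ((PySem.List.pyRange 0 (k : Int) 1).map (fun r => pvCanonRow cols r)).length = k := by
        simp [PySem.List.length_pyRange_one]
      have hrep : List.replicate (rowsN - k) (List.replicate cols.toNat false)
          = List.replicate cols.toNat false :: List.replicate (rowsN - (k + 1)) (List.replicate cols.toNat false) := by
        rw [← List.replicate_succ]; congr 1; omega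
      rw [hrep]
      simp only [List.foldl_cons, List.foldl_nil]
      set pre := (PySem.List.pyRange 0 (k : Int) 1).map (fun r => pvCanonRow cols r) with hpre
      have hglen : (k : Int).toNat < (pre ++ List.replicate cols.toNat false
          :: List.replicate (rowsN - (k + 1)) (List.replicate cols.toNat false)).length := by
        simp [hlen]
      rw [pvInner_set _ _ _ hglen]
      have hget : (pre ++ List.replicate cols.toNat false
          :: List.replicate (rowsN - (k + 1)) (List.replicate cols.toNat false)).getD (k : Int).toNat []
          = List.replicate cols.toNat false := by
        rw [show ((k:Int).toNat) = k by simp]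
        rw [List.getD_eq_getElem?_getD, List.getElem?_append_right (by omega)]
        simp [hlen]
      rw [hget, pvInner_on_fresh]
      rw [show ((k:Int).toNat) = k by simp, List.set_append]
      simp [hlen, List.append_assoc]

-- A computes the canonical grid
lemma pvA_canon (height width : Int) :
    make_herringbone_grid_py height width = pvCanon (height * 8) (width * 16) := by
  unfold make_herringbone_grid_py pv_empty pvCanon
  by_cases h : height * 8 ≤ 0
  · simp [PySem.List.pyRange_one_eq_nil h]
  · have h' : 0 < height * 8 := by omega
    have hmap : (PySem.List.pyRange 0 (height * 8) 1).map
        (fun _ => List.replicate (width * 16).toNat false)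
        = List.replicate (height * 8).toNat (List.replicate (width * 16).toNat false) := by
      rw [List.map_const', PySem.List.length_pyRange_one]; norm_num
    rw [hmap]
    have key := pvOuter_fill (width * 16) (height * 8).toNat (height * 8).toNat (le_refl _)
    rw [Nat.sub_self] at key
    have hc : (((height * 8).toNat : Int)) = height * 8 := by omega
    rw [hc] at key
    rw [List.replicate_zero, List.append_nil] at key
    exact key

-- replicated tile row equals the canonical row
lemma pvTile_row (r cols : Int) (m : Nat) (h : (m : Int) * 8 = cols) :
    (List.replicate m ((PySem.List.pyRange 0 8 1).map (fun c => pvCell r c))).flatten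
      = (PySem.List.pyRange 0 cols 1).map (fun c => pvCell r (PySem.Int.mod c 8)) := by
  subst h
  induction m with
  | zero => simp [PySem.List.pyRange_one_eq_nil (le_refl (0:Int))]
  | succ m ih =>
      rw [List.replicate_succ', List.flatten_append, ih]
      have hsplit : PySem.List.pyRange 0 (((m+1 : Nat) : Int) * 8) 1
          = PySem.List.pyRange 0 ((m : Nat) * 8 : Int) 1
            ++ PySem.List.pyRange ((m : Nat) * 8 : Int) (((m+1 : Nat) : Int) * 8) 1 := by
        apply PySem.List.pyRange_one_append <;> push_cast <;> nlinarith [Nat.cast_nonneg (α := ℤ) m]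
      rw [hsplit, List.map_append]
      congr 1
      rw [PySem.List.pyRange_one ((m : Nat) * 8 : Int) (((m+1 : Nat) : Int) * 8),
          PySem.List.pyRange_one 0 8]
      have hlen : ((((m+1 : Nat) : Int) * 8) - ((m : Nat) * 8 : Int)).toNat = (8 - (0:Int)).toNat := by
        push_cast; omega
      rw [hlen]
      simp only [List.flatten_cons, List.flatten_nil, List.append_nil, List.map_map]
      apply List.map_congr_left
      intro k hk
      simp only [Function.comp]
      congr 1
      have hk8 : k < (8 - (0:Int)).toNat := List.mem_range.mp hk
      rw [PySem.Int.mod_eq_emod_of_pos (show (0:Int) < 8 by norm_num)]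
      omega

-- B computes the canonical grid
lemma pvB_canon (height width : Int) :
    make_herringbone_grid_py_alt height width = pvCanon (height * 8) (width * 16) := by
  unfold make_herringbone_grid_py_alt pvCanon
  simp only []
  apply List.map_congr_left
  intro i hi
  have hi0 : 0 ≤ i := (PySem.List.mem_pyRange_one.mp hi).1
  unfold pvCanonRow
  have htile : PySem.List.pyGetD
      ((PySem.List.pyRange 0 8 1).map (fun r => (PySem.List.pyRange 0 8 1).map (fun c =>
        if PySem.Int.mod (PySem.Int.floordiv (r + c) 4) 2 = 0 then
          decide (PySem.Int.mod (c - r) 4 < 2)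
        else decide (PySem.Int.mod (c + r) 4 < 2))))
      (PySem.Int.mod i 8) []
      = (PySem.List.pyRange 0 8 1).map (fun c => pvCell (PySem.Int.mod i 8) c) := by
    exact PySem.List.pyGetD_map_pyRange_of_nonneg _ 8 _ []
      (PySem.Int.mod_nonneg i (by norm_num)) (PySem.Int.mod_lt i (by norm_num))
  rw [htile]
  have hdiv : PySem.Int.floordiv (width * 16) 8 = 2 * width := by
    rw [PySem.Int.floordiv_eq_ediv_of_pos (show (0:Int) < 8 by norm_num)]; omega
  by_cases hw : width ≤ 0
  · have h0 : (2 * width).toNat = 0 := by omega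
    rw [hdiv, h0, PySem.List.pyRange_one_eq_nil (show width * 16 ≤ 0 by nlinarith)]
    simp
  · have hm : (((2 * width).toNat : Int)) * 8 = width * 16 := by omega
    rw [hdiv, pvTile_row (PySem.Int.mod i 8) (width * 16) (2 * width).toNat hm]
    apply List.map_congr_left
    intro c _
    exact pvCell_per i c

-- ===== VERDICT (by name: the statement is the Claim_ definition above) =====
theorem make_herringbone_grid_py_spec : Claim_equal_make_herringbone_grid_py := by
  intro height width _
  unfold Spec_make_herringbone_grid_py
  rw [pvA_canon, pvB_canon]
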